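-- pv_equiv track=rewrite | github.com/DaRL-GenAI/instructional_agents | src/slide_enhancer.py | _parse_enhanced_content
-- ===== SOURCE A (Python) =====
-- def _parse_enhanced_content(response: str, fallback_title: str) -> tuple:
--     """解析增强后的内容，提取标题和内容"""
--     lines = response.split("\n")
--
--     title = fallback_title
--     content_start_idx = 0
--
--     # 查找标题
--     for i, line in enumerate(lines):
--         if "Enhanced Title:" in line or "**Enhanced Title:**" in line:
--             title = line.split(":", 1)[1].strip().strip("*").strip()
--             content_start_idx = i + 1
--             break
--
--     # 提取内容
--     in_content = False
--     content_lines = []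
--
--     for i, line in enumerate(lines[content_start_idx:], start=content_start_idx):
--         if "Enhanced Content:" in line or "**Enhanced Content:**" in line:
--             in_content = True
--             continue
--         if in_content:
--             if "Key Improvements" in line or "**Key Improvements" in line:
--                 break
--             content_lines.append(line)
--
--     content = "\n".join(content_lines).strip()
--
--     # 如果没有找到结构化内容，使用整个响应作为内容
--     if not content:
--         # 移除标题行
--         content = "\n".join([l for l in lines if "Enhanced Title" not in l]).strip()
--
--     return title, content
-- ===== SOURCE B (Python) =====
-- def _parse_enhanced_content(response: str, fallback_title: str) -> tuple:
--     lines = response.split("\n")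
--
--     # Title: the first line carrying the title marker, if any.
--     title, start = fallback_title, 0
--     idx = next((i for i, l in enumerate(lines) if "Enhanced Title:" in l), None)
--     if idx is not None:
--         title = lines[idx].split(":", 1)[1].strip().strip("*").strip()
--         start = idx + 1
--
--     # Content: the slice between the content marker and the next "Key Improvements" line.
--     content = ""
--     marker = next((i for i in range(start, len(lines)) if "Enhanced Content:" in lines[i]), None)
--     if marker is not None:
--         tail = lines[marker + 1:]
--         term = next((j for j, l in enumerate(tail) if "Key Improvements" in l), len(tail))
--         content = "\n".join(tail[:term]).strip()
--
--     if not content: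
--         content = "\n".join(l for l in lines if "Enhanced Title" not in l).strip()
--     return title, content
-- ===== Notes on version B (the rewrite author's own statement) =====
-- stated objective: alternative
-- what changed: Replaces A's in_content flag loop with boundary-index location (find-first of the content marker and of the 'Key Improvements' terminator) followed by a plain slice; Pre_ excludes responses where more than one line contains 'Enhanced Content:', on which A's continue-on-every-marker-line skipping of repeated marker lines inside the content is accidental and either value is defensible.
import Mathlib
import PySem

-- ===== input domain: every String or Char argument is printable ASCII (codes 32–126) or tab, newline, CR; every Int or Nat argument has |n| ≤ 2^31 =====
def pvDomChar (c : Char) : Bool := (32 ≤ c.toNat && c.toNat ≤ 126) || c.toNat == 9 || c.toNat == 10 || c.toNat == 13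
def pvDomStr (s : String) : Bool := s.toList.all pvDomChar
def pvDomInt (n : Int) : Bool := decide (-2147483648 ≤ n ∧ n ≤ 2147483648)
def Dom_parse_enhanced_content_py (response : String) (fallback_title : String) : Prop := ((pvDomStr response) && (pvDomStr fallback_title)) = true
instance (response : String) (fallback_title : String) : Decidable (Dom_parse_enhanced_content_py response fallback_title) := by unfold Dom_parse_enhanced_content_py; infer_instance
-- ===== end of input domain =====

-- B locates the content by boundary indices (find-first of the marker, then of the terminator)
-- and takes a plain slice, instead of A's in_content flag loop; same cost (objective: alternative).

-- ===== PORT A =====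
-- line.split(":", 1)[1].strip().strip("*").strip(); the [1] access is only reached on lines
-- containing ":", so the `.getD ""` defaults never fire.
def pvA_titleOf (l : String) : String :=
  let parts := (PySem.Str.splitMax? l ":" 1).getD []
  PySem.Str.strip (PySem.Str.stripChars (PySem.Str.strip ((PySem.List.pyGet? parts 1).getD "")) "*")

-- the first loop: break on the first title line, carrying (title, content_start_idx)
def pvA_findTitle : List String → Nat → Option (String × Nat)
  | [], _ => none
  | l :: r, i =>
    if PySem.Str.isIn "Enhanced Title:" l || PySem.Str.isIn "**Enhanced Title:**" l then
      some (pvA_titleOf l, i + 1)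
    else pvA_findTitle r (i + 1)

-- the second loop: the in_content flag, continue on marker lines, break on "Key Improvements"
def pvA_collect : List String → Bool → List String → List String
  | [], _, acc => acc
  | l :: r, inc, acc =>
    if PySem.Str.isIn "Enhanced Content:" l || PySem.Str.isIn "**Enhanced Content:**" l then
      pvA_collect r true acc
    else if inc then
      (if PySem.Str.isIn "Key Improvements" l || PySem.Str.isIn "**Key Improvements" l then acc
       else pvA_collect r inc (acc ++ [l]))
    else pvA_collect r inc acc

def parse_enhanced_content_py (response : String) (fallback_title : String) : String × String :=
  -- split? is `some` whenever the separator is nonempty, so the .getD [] never fires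
  let lines := (PySem.Str.split? response "\n").getD []
  let (title, start) := (pvA_findTitle lines 0).getD (fallback_title, 0)
  let contentLines := pvA_collect (lines.drop start) false []
  let content := PySem.Str.strip (PySem.Str.join "\n" contentLines)
  let content :=
    if content == "" then
      PySem.Str.strip (PySem.Str.join "\n" (lines.filter (fun l => !PySem.Str.isIn "Enhanced Title" l)))
    else content
  (title, content)

-- ===== PORT B =====
def parse_enhanced_content_py_alt (response : String) (fallback_title : String) : String × String :=
  let lines := (PySem.Str.split? response "\n").getD []
  let (title, start) :=
    match lines.findIdx? (fun l => PySem.Str.isIn "Enhanced Title:" l) with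
    | none => (fallback_title, 0)
    | some i =>
      -- lines[i].split(":", 1)[1].strip().strip("*").strip(); defaults unreachable as the line has ":"
      let parts := (PySem.Str.splitMax? (lines.getD i "") ":" 1).getD []
      (PySem.Str.strip (PySem.Str.stripChars (PySem.Str.strip ((PySem.List.pyGet? parts 1).getD "")) "*"), i + 1)
  let content :=
    match (lines.drop start).findIdx? (fun l => PySem.Str.isIn "Enhanced Content:" l) with
    | none => ""
    | some j =>
      let tail := lines.drop (start + j + 1)   -- lines[marker+1:]
      let t := (tail.findIdx? (fun l => PySem.Str.isIn "Key Improvements" l)).getD tail.length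
      PySem.Str.strip (PySem.Str.join "\n" (tail.take t))
  let content :=
    if content == "" then
      PySem.Str.strip (PySem.Str.join "\n" (lines.filter (fun l => !PySem.Str.isIn "Enhanced Title" l)))
    else content
  (title, content)

-- ===== PRECONDITION & SPEC =====
-- Pre_ excludes responses in which more than one line contains "Enhanced Content:": there A's
-- continue-on-every-marker-line behaviour (silently dropping repeated marker lines inside the
-- content) is accidental, and either value is defensible.
def Pre_parse_enhanced_content_py (response : String) (fallback_title : String) : Prop :=
  ((PySem.Str.split? response "\n").getD []).countP
    (fun l => PySem.Str.isIn "Enhanced Content:" l) ≤ 1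
instance (response : String) (fallback_title : String) : Decidable (Pre_parse_enhanced_content_py response fallback_title) := by unfold Pre_parse_enhanced_content_py; infer_instance

def pvWitness_parse_enhanced_content_py : String × String :=
  ("Enhanced Title: T\nEnhanced Content:\nbody", "f")

def Spec_parse_enhanced_content_py (response : String) (fallback_title : String) (out : String × String) : Prop := out = parse_enhanced_content_py_alt response fallback_title
instance (response : String) (fallback_title : String) (out : String × String) : Decidable (Spec_parse_enhanced_content_py response fallback_title out) := by unfold Spec_parse_enhanced_content_py; infer_instance

-- ===== CLAIM =====
def Claim_equal_parse_enhanced_content_py : Prop := ∀ (response : String) (fallback_title : String), Dom_parse_enhanced_content_py response fallback_title → Pre_parse_enhanced_content_py response fallback_title → Spec_parse_enhanced_content_py response fallback_title (parse_enhanced_content_py response fallback_title)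

-- ===== LEMMAS AND PROOFS =====

-- "sub1 occurs in every string in which sub2 occurs", for sub1 an infix of sub2
theorem pv_isIn_mono (sub1 sub2 l : String) (h : sub1.toList <:+: sub2.toList)
    (h2 : PySem.Str.isIn sub2 l = true) : PySem.Str.isIn sub1 l = true := by
  simp only [PySem.Str.isIn_eq, PySem.Chars.isIn_iff_infix] at *
  exact h.trans h2

theorem pv_or_absorb (a b : Bool) (h : b = true → a = true) : (a || b) = a := by
  cases a <;> cases b <;> simp_all

theorem pv_title_or (l : String) :
    (PySem.Str.isIn "Enhanced Title:" l || PySem.Str.isIn "**Enhanced Title:**" l)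
      = PySem.Str.isIn "Enhanced Title:" l :=
  pv_or_absorb _ _ (pv_isIn_mono _ _ _ (by decide))

theorem pv_content_or (l : String) :
    (PySem.Str.isIn "Enhanced Content:" l || PySem.Str.isIn "**Enhanced Content:**" l)
      = PySem.Str.isIn "Enhanced Content:" l :=
  pv_or_absorb _ _ (pv_isIn_mono _ _ _ (by decide))

theorem pv_key_or (l : String) :
    (PySem.Str.isIn "Key Improvements" l || PySem.Str.isIn "**Key Improvements" l)
      = PySem.Str.isIn "Key Improvements" l :=
  pv_or_absorb _ _ (pv_isIn_mono _ _ _ (by decide))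

-- the title break-loop is a find-first
theorem pv_findTitle_eq (ls : List String) (i : Nat) :
    pvA_findTitle ls i
      = (ls.findIdx? (fun l => PySem.Str.isIn "Enhanced Title:" l)).map
          (fun j => (pvA_titleOf (ls.getD j ""), i + j + 1)) := by
  induction ls generalizing i with
  | nil => simp [pvA_findTitle]
  | cons l r ih =>
    rw [pvA_findTitle, pv_title_or, List.findIdx?_cons]
    by_cases h : PySem.Str.isIn "Enhanced Title:" l = true
    · simp [h, -PySem.Str.isIn_eq]
    · simp only [Bool.not_eq_true] at h
      cases hf : r.findIdx? (fun l => PySem.Str.isIn "Enhanced Title:" l) with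
      | none => simp [h, hf, ih (i + 1), -PySem.Str.isIn_eq]
      | some j =>
        simp [h, hf, ih (i + 1), List.getD_cons_succ, Prod.ext_iff, -PySem.Str.isIn_eq] <;> omega

-- once in_content is set, A collects the slice up to the first terminator line,
-- dropping marker lines
theorem pv_collect_true (ls : List String) (acc : List String) :
    pvA_collect ls true acc
      = acc ++ ((ls.take ((ls.findIdx? (fun l =>
            PySem.Str.isIn "Key Improvements" l && !PySem.Str.isIn "Enhanced Content:" l)).getD ls.length)).filter
          (fun l => !PySem.Str.isIn "Enhanced Content:" l)) := by
  induction ls generalizing acc with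
  | nil => simp [pvA_collect]
  | cons l r ih =>
    rw [pvA_collect, pv_content_or, pv_key_or, List.findIdx?_cons]
    by_cases hp : PySem.Str.isIn "Enhanced Content:" l = true
    · rw [if_pos hp, ih]
      cases h : r.findIdx? (fun l =>
          PySem.Str.isIn "Key Improvements" l && !PySem.Str.isIn "Enhanced Content:" l) with
      | none => simp [h, hp, List.take_succ_cons, List.filter_cons, -PySem.Str.isIn_eq]
      | some j => simp [h, hp, List.take_succ_cons, List.filter_cons, -PySem.Str.isIn_eq]
    · by_cases hq : PySem.Str.isIn "Key Improvements" l = true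
      · simp [hp, hq, -PySem.Str.isIn_eq]
      · rw [if_neg hp, if_pos rfl, if_neg hq, ih]
        cases h : r.findIdx? (fun l =>
            PySem.Str.isIn "Key Improvements" l && !PySem.Str.isIn "Enhanced Content:" l) with
        | none => simp [h, hp, hq, List.take_succ_cons, List.filter_cons, -PySem.Str.isIn_eq]
        | some j => simp [h, hp, hq, List.take_succ_cons, List.filter_cons, -PySem.Str.isIn_eq]

-- before the marker A collects nothing; at the first marker it switches to in_content
theorem pv_collect_false (ls : List String) :
    pvA_collect ls false []
      = match ls.findIdx? (fun l => PySem.Str.isIn "Enhanced Content:" l) with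
        | none => []
        | some m => pvA_collect (ls.drop (m + 1)) true [] := by
  induction ls with
  | nil => simp [pvA_collect]
  | cons l r ih =>
    rw [pvA_collect, pv_content_or, List.findIdx?_cons]
    by_cases hp : PySem.Str.isIn "Enhanced Content:" l = true
    · simp [hp, -PySem.Str.isIn_eq]
    · rw [if_neg hp, if_neg (by simp), ih]
      cases h : r.findIdx? (fun l => PySem.Str.isIn "Enhanced Content:" l) with
      | none => simp [h, hp, -PySem.Str.isIn_eq]
      | some m => simp [h, hp, -PySem.Str.isIn_eq]

-- findIdx? depends only on the predicate's values on members
theorem pv_findIdx?_congr {α : Type} (p q : α → Bool) (l : List α)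
    (h : ∀ a ∈ l, p a = q a) : l.findIdx? p = l.findIdx? q := by
  induction l with
  | nil => rfl
  | cons a r ih =>
    rw [List.findIdx?_cons, List.findIdx?_cons, h a (by simp),
      ih (fun b hb => h b (by simp [hb]))]

-- with at most one marker in ls, everything after the first marker is marker-free
theorem pv_after_marker {α : Type} (p : α → Bool) (ls : List α) (j : Nat)
    (hf : ls.findIdx? p = some j) (hc : ls.countP p ≤ 1) :
    ∀ a ∈ ls.drop (j + 1), p a = false := by
  induction ls generalizing j with
  | nil => simp at hf
  | cons x r ih =>
    rw [List.findIdx?_cons] at hf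
    cases hx : p x with
    | true =>
      rw [hx] at hf
      simp at hf
      subst hf
      have h0 : r.countP p = 0 := by
        rw [List.countP_cons_of_pos hx] at hc; omega
      intro a ha
      have ha' : a ∈ r := by simpa using ha
      have := (List.countP_eq_zero.mp h0) a ha'
      simpa using this
    | false =>
      rw [hx] at hf
      simp only [Bool.false_eq_true, if_false, Option.map_eq_some_iff] at hf
      obtain ⟨j', hf', rfl⟩ := hf
      rw [List.countP_cons_of_neg (by simp [hx])] at hc
      simpa using ih j' hf' hc

theorem pv_countP_drop_le {α : Type} (p : α → Bool) (ls : List α) (n : Nat) :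
    (ls.drop n).countP p ≤ ls.countP p := by
  conv_rhs => rw [← List.take_append_drop n ls]
  rw [List.countP_append]; omega

-- ===== VERDICT =====
theorem parse_enhanced_content_py_spec : Claim_equal_parse_enhanced_content_py := by
  intro response fallback_title _ hPre
  unfold Pre_parse_enhanced_content_py at hPre
  unfold Spec_parse_enhanced_content_py parse_enhanced_content_py parse_enhanced_content_py_alt
  simp only [pv_findTitle_eq]
  set lines := (PySem.Str.split? response "\n").getD [] with hlines
  have main : ∀ start : Nat,
      pvA_collect (lines.drop start) false []
        = match (lines.drop start).findIdx? (fun l => PySem.Str.isIn "Enhanced Content:" l) with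
          | none => []
          | some j =>
            (lines.drop (start + j + 1)).take
              (((lines.drop (start + j + 1)).findIdx?
                  (fun l => PySem.Str.isIn "Key Improvements" l)).getD
                (lines.drop (start + j + 1)).length) := by
    intro start
    rw [pv_collect_false]
    cases hc : (lines.drop start).findIdx? (fun l => PySem.Str.isIn "Enhanced Content:" l) with
    | none => simp
    | some j =>
      simp only
      have hdd : (lines.drop start).drop (j + 1) = lines.drop (start + j + 1) := by
        rw [List.drop_drop]; ring_nf
      have hfree : ∀ a ∈ lines.drop (start + j + 1),
          PySem.Str.isIn "Enhanced Content:" a = false := by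
        rw [← hdd]
        exact pv_after_marker _ _ _ hc (le_trans (pv_countP_drop_le _ _ _) hPre)
      rw [pv_collect_true, hdd, List.nil_append,
        pv_findIdx?_congr (fun l => PySem.Str.isIn "Key Improvements" l && !PySem.Str.isIn "Enhanced Content:" l)
          (fun l => PySem.Str.isIn "Key Improvements" l) _
          (fun a ha => by simp [hfree a ha, -PySem.Str.isIn_eq]),
        List.filter_eq_self.mpr
          (fun a ha => by simp [hfree a (List.mem_of_mem_take ha), -PySem.Str.isIn_eq])]
  cases ht : lines.findIdx? (fun l => PySem.Str.isIn "Enhanced Title:" l) with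
  | none =>
    simp only [ht, Option.map_none, Option.getD_none]
    rw [main 0]
    cases hc : (lines.drop 0).findIdx? (fun l => PySem.Str.isIn "Enhanced Content:" l) with
    | none =>
      simp [hc, -PySem.Str.isIn_eq,
        show PySem.Str.strip (PySem.Str.join "\n" []) = "" from by decide]
    | some m => simp [hc, -PySem.Str.isIn_eq]
  | some i =>
    simp only [ht, Option.map_some, Option.getD_some, Nat.zero_add, pvA_titleOf]
    rw [main (i + 1)]
    cases hc : (lines.drop (i + 1)).findIdx? (fun l => PySem.Str.isIn "Enhanced Content:" l) with
    | none =>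
      simp [hc, -PySem.Str.isIn_eq,
        show PySem.Str.strip (PySem.Str.join "\n" []) = "" from by decide]
    | some m => simp [hc, -PySem.Str.isIn_eq]
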